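-- pv_equiv track=rewrite | github.com/abdi-ali1/python_Opdracht | main.py | calculateHeateDays
-- ===== SOURCE A (Python) =====
-- def calculateHeateDays(temperatures):
--         heatDays = 0
--         for temp in temperatures:
--             if temp >= 25:
--                 heatDays+= 1
--             else:
--                 heatDays = 0
--         return heatDays
-- ===== SOURCE B (Python) =====
-- def calculateHeateDays(temperatures):
--     seq = list(temperatures)
--     count = 0
--     for temp in reversed(seq):
--         if temp >= 25:
--             count += 1
--         else:
--             break
--     return count
-- ===== Notes on version B (the rewrite author's own statement) =====
-- stated objective: alternative
-- what changed: Backward scan over the reversed list counting the trailing streak of temps >= 25 with early break, instead of a forward scan that resets the counter at every cold day.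
import Mathlib
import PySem

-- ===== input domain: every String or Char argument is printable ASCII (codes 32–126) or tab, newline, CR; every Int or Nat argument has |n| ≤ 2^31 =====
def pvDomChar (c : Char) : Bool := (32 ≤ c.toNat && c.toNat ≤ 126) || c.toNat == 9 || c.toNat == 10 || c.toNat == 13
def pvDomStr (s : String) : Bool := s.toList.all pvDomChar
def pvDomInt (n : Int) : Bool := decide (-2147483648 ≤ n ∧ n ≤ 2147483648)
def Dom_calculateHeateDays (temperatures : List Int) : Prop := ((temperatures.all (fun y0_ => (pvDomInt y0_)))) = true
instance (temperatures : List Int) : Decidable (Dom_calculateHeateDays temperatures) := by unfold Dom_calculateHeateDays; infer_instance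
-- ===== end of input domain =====

-- B replaces A's forward scan with counter resets by a backward scan that counts the
-- trailing streak of temps ≥ 25 and stops at the first colder day (objective: alternative).

-- ===== PORT A =====
-- forward loop: heatDays += 1 on temp >= 25, reset to 0 otherwise
def calculateHeateDays (temperatures : List Int) : Int :=
  temperatures.foldl (fun heatDays temp => if 25 ≤ temp then heatDays + 1 else 0) 0

-- ===== PORT B =====
-- 'for temp in reversed(seq): if temp >= 25: count += 1 else: break'
def pvBackCount (l : List Int) : Int :=
  match l with
  | [] => 0
  | temp :: rest => if 25 ≤ temp then 1 + pvBackCount rest else 0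

def calculateHeateDays_alt (temperatures : List Int) : Int :=
  pvBackCount temperatures.reverse

-- ===== PRECONDITION & SPEC =====
def Spec_calculateHeateDays (temperatures : List Int) (out : Int) : Prop := out = calculateHeateDays_alt temperatures
instance (temperatures : List Int) (out : Int) : Decidable (Spec_calculateHeateDays temperatures out) := by unfold Spec_calculateHeateDays; infer_instance

-- ===== CLAIM (what is proved, stated in full; the proofs are below) =====
def Claim_equal_calculateHeateDays : Prop := ∀ (temperatures : List Int), Dom_calculateHeateDays temperatures → Spec_calculateHeateDays temperatures (calculateHeateDays temperatures)

-- ===== LEMMAS AND PROOFS =====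
theorem pvFold_eq_backCount (l : List Int) :
    l.foldl (fun heatDays temp => if 25 ≤ temp then heatDays + 1 else 0) 0
      = pvBackCount l.reverse := by
  induction l using List.reverseRecOn with
  | nil => simp [pvBackCount]
  | append_singleton l t ih =>
      rw [List.foldl_append, List.reverse_append]
      simp only [List.foldl_cons, List.foldl_nil, List.reverse_singleton, List.singleton_append,
        pvBackCount, ih]
      split_ifs <;> omega

-- ===== VERDICT (by name: the statement is the Claim_ definition above) =====
theorem calculateHeateDays_spec : Claim_equal_calculateHeateDays := by
  intro l _
  unfold Spec_calculateHeateDays calculateHeateDays calculateHeateDays_alt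
  exact pvFold_eq_backCount l
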